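-- pv_equiv track=rewrite | github.com/goyalsgit/Virtual_paint_and_handwritten-text-recognizer | backend/hand_draw.py | get_toolbar_hit
-- ===== SOURCE A (Python) =====
-- COLORS = [
--     ("White",  (255, 255, 255)),
--     ("Red",    (0,   0,   255)),
--     ("Green",  (0,   200, 0  )),
--     ("Blue",   (255, 50,  50 )),
--     ("Yellow", (0,   255, 255)),
--     ("Orange", (0,   165, 255)),
--     ("Pink",   (203, 192, 255)),
--     ("Cyan",   (255, 255, 0  )),
-- ]
--
-- TOOLBAR_HEIGHT  = 90
--
-- COLOR_BOX_SIZE  = 60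
--
-- COLOR_BOX_GAP   = 12
--
-- TOOLBAR_START_X = 20
--
-- ERASER_X = TOOLBAR_START_X + len(COLORS) * (COLOR_BOX_SIZE + COLOR_BOX_GAP) + 20
--
-- ERASER_W = 80
--
-- CLEAR_X  = ERASER_X + ERASER_W + 10
--
-- CLEAR_W  = 80
--
-- def get_toolbar_hit(x, y):
--     """
--     Returns what toolbar item the finger is pointing at.
--      0-7  = color index
--     -2    = eraser button
--     -3    = clear button
--     -1    = nothing
--     """
--     if y > TOOLBAR_HEIGHT:
--         return -1
--     for i in range(len(COLORS)):
--         bx = TOOLBAR_START_X + i * (COLOR_BOX_SIZE + COLOR_BOX_GAP)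
--         if bx <= x <= bx + COLOR_BOX_SIZE:
--             return i
--     if ERASER_X <= x <= ERASER_X + ERASER_W:
--         return -2
--     if CLEAR_X <= x <= CLEAR_X + CLEAR_W:
--         return -3
--     return -1
-- ===== SOURCE B (Python) =====
-- TOOLBAR_HEIGHT  = 90
-- COLOR_BOX_SIZE  = 60
-- COLOR_BOX_GAP   = 12
-- TOOLBAR_START_X = 20
-- NUM_COLORS      = 8
-- ERASER_X = TOOLBAR_START_X + NUM_COLORS * (COLOR_BOX_SIZE + COLOR_BOX_GAP) + 20
-- ERASER_W = 80
-- CLEAR_X  = ERASER_X + ERASER_W + 10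
-- CLEAR_W  = 80
--
-- def get_toolbar_hit(x, y):
--     """Direct arithmetic indexing instead of scanning all color boxes."""
--     if y > TOOLBAR_HEIGHT:
--         return -1
--     period = COLOR_BOX_SIZE + COLOR_BOX_GAP
--     i = (x - TOOLBAR_START_X) // period
--     # bx <= x holds by definition of floor division; only the right edge needs a check
--     if 0 <= i < NUM_COLORS and x <= TOOLBAR_START_X + i * period + COLOR_BOX_SIZE:
--         return i
--     if ERASER_X <= x <= ERASER_X + ERASER_W:
--         return -2
--     if CLEAR_X <= x <= CLEAR_X + CLEAR_W:
--         return -3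
--     return -1
-- ===== Notes on version B (the rewrite author's own statement) =====
-- stated objective: simpler
-- what changed: Replaced the 8-iteration scan over color boxes with direct arithmetic indexing: i = (x - TOOLBAR_START_X) // period plus a right-edge check against the gap.
import Mathlib
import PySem

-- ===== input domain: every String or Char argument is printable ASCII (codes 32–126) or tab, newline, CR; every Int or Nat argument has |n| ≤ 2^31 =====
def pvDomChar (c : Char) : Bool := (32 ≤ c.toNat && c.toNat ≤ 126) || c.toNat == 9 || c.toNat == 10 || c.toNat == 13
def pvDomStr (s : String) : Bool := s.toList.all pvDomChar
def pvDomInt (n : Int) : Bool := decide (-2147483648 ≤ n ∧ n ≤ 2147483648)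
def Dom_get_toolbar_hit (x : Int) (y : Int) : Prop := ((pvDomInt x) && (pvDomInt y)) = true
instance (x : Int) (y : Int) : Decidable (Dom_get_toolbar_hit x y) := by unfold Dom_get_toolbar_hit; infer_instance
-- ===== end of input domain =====

-- ===== PORT A =====
-- scan: literal transliteration of A's for-loop over range(len(COLORS)); on no hit,
-- falls through to the eraser/clear checks exactly as A's code after the loop does
def get_toolbar_hit_loop (x : Int) : List Int → Int
  | [] =>
      if 616 ≤ x ∧ x ≤ 616 + 80 then -2
      else if 706 ≤ x ∧ x ≤ 706 + 80 then -3
      else -1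
  | i :: rest =>
      let bx := 20 + i * (60 + 12)
      if bx ≤ x ∧ x ≤ bx + 60 then i else get_toolbar_hit_loop x rest

def get_toolbar_hit (x : Int) (y : Int) : Int :=
  if y > 90 then -1
  else get_toolbar_hit_loop x (PySem.List.pyRange 0 8 1)

-- ===== PORT B =====
-- direct arithmetic indexing (Source B): i = (x - 20) // 72, right-edge check only
def get_toolbar_hit_alt (x : Int) (y : Int) : Int :=
  if y > 90 then -1
  else
    let period : Int := 60 + 12
    let i := PySem.Int.floordiv (x - 20) period
    if 0 ≤ i ∧ i < 8 ∧ x ≤ 20 + i * period + 60 then i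
    else if 616 ≤ x ∧ x ≤ 616 + 80 then -2
    else if 706 ≤ x ∧ x ≤ 706 + 80 then -3
    else -1

-- ===== PRECONDITION & SPEC =====
def Spec_get_toolbar_hit (x : Int) (y : Int) (out : Int) : Prop := out = get_toolbar_hit_alt x y
instance (x : Int) (y : Int) (out : Int) : Decidable (Spec_get_toolbar_hit x y out) := by unfold Spec_get_toolbar_hit; infer_instance

-- ===== CLAIM (what is proved, stated in full; the proofs are below) =====
def Claim_equal_get_toolbar_hit : Prop := ∀ (x : Int) (y : Int), Dom_get_toolbar_hit x y → Spec_get_toolbar_hit x y (get_toolbar_hit x y)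

-- ===== LEMMAS AND PROOFS =====

-- ===== VERDICT (by name: the statement is the Claim_ definition above) =====
set_option maxHeartbeats 2000000 in
theorem get_toolbar_hit_spec : Claim_equal_get_toolbar_hit := by
  intro x y _
  unfold Spec_get_toolbar_hit get_toolbar_hit get_toolbar_hit_alt
  rw [show PySem.List.pyRange 0 8 1 = [0,1,2,3,4,5,6,7] from by decide]
  simp only [get_toolbar_hit_loop,
    PySem.Int.floordiv_eq_ediv_of_pos (a := x - 20) (b := (60:Int) + 12) (by norm_num)]
  split_ifs <;> omega
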